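-- pv_equiv track=rewrite | github.com/dxtr-labs/v1.0 | backend/mcp/production_mcp_architecture.py | _handle_memory_query
-- ===== SOURCE A (Python) =====
-- def _handle_memory_query(message: str, memory: list) -> str:
--     """Handle queries about past conversations"""
--
--     # Search through memory for relevant information
--     relevant_memories = []
--     message_lower = message.lower()
--
--     for interaction in memory:
--         user_msg = interaction.get('user_message', '').lower()
--         response = interaction.get('response', '').lower()
--
--         # Simple keyword matching
--         if any(word in user_msg or word in response for word in message_lower.split()):
--             relevant_memories.append(interaction)
--
--     if relevant_memories:
--         latest_memory = relevant_memories[-1]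
--         return f"I remember our conversation about that. You mentioned: '{latest_memory.get('user_message', '')}' and I helped you with it. Is there something specific you'd like to know or do related to this?"
--     else:
--         return "I don't have specific information about that in our conversation history yet. Could you provide more details so I can remember it for future reference?"
-- ===== SOURCE B (Python) =====
-- def _handle_memory_query(message: str, memory: list) -> str:
--     """Handle queries about past conversations"""
--     words = message.lower().split()
--     for interaction in reversed(memory):
--         user_msg = interaction.get('user_message', '').lower()
--         response = interaction.get('response', '').lower()
--         if any(word in user_msg or word in response for word in words):
--             return f"I remember our conversation about that. You mentioned: '{interaction.get('user_message', '')}' and I helped you with it. Is there something specific you'd like to know or do related to this?"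
--     return "I don't have specific information about that in our conversation history yet. Could you provide more details so I can remember it for future reference?"
-- ===== Notes on version B (the rewrite author's own statement) =====
-- stated objective: simpler
-- what changed: B drops the relevant_memories accumulator: it scans the memory in reverse and returns at the first keyword match, instead of collecting all matches and taking the last one.
import Mathlib
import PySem

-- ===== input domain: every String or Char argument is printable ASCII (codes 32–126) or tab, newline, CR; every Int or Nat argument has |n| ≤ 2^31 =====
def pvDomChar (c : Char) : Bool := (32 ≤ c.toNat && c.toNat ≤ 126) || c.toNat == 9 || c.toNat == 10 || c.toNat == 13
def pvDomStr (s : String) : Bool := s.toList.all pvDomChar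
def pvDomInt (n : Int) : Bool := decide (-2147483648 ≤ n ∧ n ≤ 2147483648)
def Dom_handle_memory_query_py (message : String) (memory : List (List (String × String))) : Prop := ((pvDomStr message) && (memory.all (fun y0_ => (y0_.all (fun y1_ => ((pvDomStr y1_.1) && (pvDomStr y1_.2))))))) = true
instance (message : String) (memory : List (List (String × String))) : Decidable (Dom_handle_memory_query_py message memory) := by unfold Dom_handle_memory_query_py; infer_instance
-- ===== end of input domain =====

-- B drops A's relevant_memories accumulator: it scans the memory in reverse and returns at the
-- first keyword match (A collects all matching interactions and formats the last one).

-- shared helpers: the two return strings and the keyword-match predicate, byte-for-byte the same in A and B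
def pvFmtFound (um : String) : String :=
  "I remember our conversation about that. You mentioned: '" ++ um ++ "' and I helped you with it. Is there something specific you'd like to know or do related to this?"

def pvFmtNone : String :=
  "I don't have specific information about that in our conversation history yet. Could you provide more details so I can remember it for future reference?"

def pvMatches (words : List String) (inter : List (String × String)) : Bool :=
  let user_msg := PySem.Str.lower ((PySem.Dict.mk inter).getD "user_message" "")
  let response := PySem.Str.lower ((PySem.Dict.mk inter).getD "response" "")
  words.any (fun w => PySem.Str.isIn w user_msg || PySem.Str.isIn w response)

-- ===== PORT A =====
def handle_memory_query_py (message : String) (memory : List (List (String × String))) : String :=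
  let words := PySem.Str.split₀ (PySem.Str.lower message)
  let relevant := memory.foldl (fun acc inter => if pvMatches words inter then acc ++ [inter] else acc) []
  match relevant.getLast? with
  | some latest => pvFmtFound ((PySem.Dict.mk latest).getD "user_message" "")
  | none => pvFmtNone

-- ===== PORT B =====
def pvScanRev (words : List String) : List (List (String × String)) → String
  | [] => pvFmtNone
  | inter :: rest =>
      if pvMatches words inter then
        pvFmtFound ((PySem.Dict.mk inter).getD "user_message" "")
      else pvScanRev words rest

def handle_memory_query_py_alt (message : String) (memory : List (List (String × String))) : String :=
  pvScanRev (PySem.Str.split₀ (PySem.Str.lower message)) memory.reverse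

-- ===== PRECONDITION & SPEC =====
def Spec_handle_memory_query_py (message : String) (memory : List (List (String × String))) (out : String) : Prop := out = handle_memory_query_py_alt message memory
instance (message : String) (memory : List (List (String × String))) (out : String) : Decidable (Spec_handle_memory_query_py message memory out) := by unfold Spec_handle_memory_query_py; infer_instance

-- ===== CLAIM (what is proved, stated in full; the proofs are below) =====
def Claim_equal_handle_memory_query_py : Prop := ∀ (message : String) (memory : List (List (String × String))), Dom_handle_memory_query_py message memory → Spec_handle_memory_query_py message memory (handle_memory_query_py message memory)

-- ===== LEMMAS AND PROOFS =====

-- A's accumulator loop is a filter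
theorem pv_foldl_filter (words : List String) (l : List (List (String × String)))
    (acc : List (List (String × String))) :
    l.foldl (fun acc inter => if pvMatches words inter then acc ++ [inter] else acc) acc
      = acc ++ l.filter (pvMatches words) := by
  induction l generalizing acc with
  | nil => simp
  | cons x xs ih =>
      simp only [List.foldl_cons, List.filter_cons]
      by_cases h : pvMatches words x = true <;> simp [h, ih]

-- B's scan is the first match in its argument
theorem pv_scanRev_eq_find (words : List String) (l : List (List (String × String))) :
    pvScanRev words l
      = match l.find? (pvMatches words) with
        | some m => pvFmtFound ((PySem.Dict.mk m).getD "user_message" "")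
        | none => pvFmtNone := by
  induction l with
  | nil => rfl
  | cons x xs ih =>
      by_cases h : pvMatches words x = true <;> simp [pvScanRev, h, ih]

theorem pv_head_filter_eq_find {α : Type} (p : α → Bool) (l : List α) :
    (l.filter p).head? = l.find? p := by
  induction l with
  | nil => rfl
  | cons x xs ih =>
      by_cases h : p x = true <;> simp [h, ih]

-- ===== VERDICT (by name: the statement is the Claim_ definition above) =====
theorem handle_memory_query_py_spec : Claim_equal_handle_memory_query_py := by
  intro message memory _
  unfold Spec_handle_memory_query_py handle_memory_query_py handle_memory_query_py_alt
  simp only [pv_foldl_filter, pv_scanRev_eq_find, List.nil_append]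
  rw [← pv_head_filter_eq_find, List.filter_reverse, List.head?_reverse]
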